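-- pv_equiv track=rewrite | github.com/malcolmbarrett/kanji-mnemonic | kanji_mnemonic/lookup.py | reverse_lookup_radical
-- ===== SOURCE A (Python) =====
-- def reverse_lookup_radical(
--     name: str,
--     wk_radicals: dict,
--     personal_radicals: dict,
-- ) -> str | None:
--     """Look up a radical character by its name (case-insensitive).
--
--     Checks personal radicals first, then WK radicals.
--     Returns the character, or None if not found.
--     """
--     name_lower = name.lower()
--
--     # Personal radicals first (higher priority)
--     for char, rad_name in personal_radicals.items():
--         if rad_name.lower() == name_lower:
--             return char
--
--     # WK radicals
--     for char, info in wk_radicals.items():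
--         if info["name"].lower() == name_lower:
--             return char
--
--     return None
-- ===== SOURCE B (Python) =====
-- def reverse_lookup_radical(
--     name: str,
--     wk_radicals: dict,
--     personal_radicals: dict,
-- ) -> str | None:
--     """Build a name->char reverse index once, then do a single lookup.
--
--     First-wins within each source (setdefault); personal entries override
--     WK entries in the merge, matching the original's priority.
--     """
--     wk_map = {}
--     for char, info in wk_radicals.items():
--         wk_map.setdefault(info["name"].lower(), char)
--     personal_map = {}
--     for char, rad_name in personal_radicals.items():
--         personal_map.setdefault(rad_name.lower(), char)
--     merged = {**wk_map, **personal_map}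
--     return merged.get(name.lower())
-- ===== Notes on version B (the rewrite author's own statement) =====
-- stated objective: alternative
-- what changed: Replaces the two early-return linear scans by building a reverse name->char index (setdefault for first-wins, dict merge for personal-over-WK priority) followed by a single .get lookup.
-- outside the precondition, e.g. on reverse_lookup_radical('fire', {'a': {}}, {'f': 'Fire'}): A returns 'f', B raises KeyError
import Mathlib
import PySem

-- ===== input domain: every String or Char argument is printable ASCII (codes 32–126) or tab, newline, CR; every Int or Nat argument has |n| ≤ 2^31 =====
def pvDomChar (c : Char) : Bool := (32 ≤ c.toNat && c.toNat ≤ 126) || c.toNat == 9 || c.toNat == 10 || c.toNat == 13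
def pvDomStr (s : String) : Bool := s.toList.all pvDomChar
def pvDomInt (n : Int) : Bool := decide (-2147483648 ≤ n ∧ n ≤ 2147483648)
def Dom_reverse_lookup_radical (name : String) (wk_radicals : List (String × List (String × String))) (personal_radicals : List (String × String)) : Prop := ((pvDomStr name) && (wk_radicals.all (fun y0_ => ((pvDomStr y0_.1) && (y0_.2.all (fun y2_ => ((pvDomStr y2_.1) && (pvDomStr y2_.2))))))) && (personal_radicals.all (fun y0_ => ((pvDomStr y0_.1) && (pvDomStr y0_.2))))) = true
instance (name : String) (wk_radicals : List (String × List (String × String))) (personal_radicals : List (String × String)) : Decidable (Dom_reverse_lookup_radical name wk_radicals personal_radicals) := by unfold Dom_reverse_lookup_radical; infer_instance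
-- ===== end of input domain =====

-- B replaces A's two early-return linear scans by building a reverse name->char index
-- (setdefault for first-wins, dict merge for personal-over-WK priority) and doing one lookup.


-- ===== PORT A =====
-- the personal-radicals scan: first entry whose lowered name equals name_lower
def pvAPersonal (nl : String) : List (String × String) → Option String
  | [] => none
  | (char, rad_name) :: t =>
      if PySem.Str.lower rad_name = nl then some char else pvAPersonal nl t

-- the WK scan; info["name"] raises KeyError when missing, so the `none` branch
-- (excluded by Pre_) just stops — exact wherever Python A returns
def pvAWk (nl : String) : List (String × List (String × String)) → Option String
  | [] => none
  | (char, info) :: t =>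
      match (PySem.Dict.mk info).get? "name" with
      | none => none
      | some s => if PySem.Str.lower s = nl then some char else pvAWk nl t

def reverse_lookup_radical (name : String) (wk_radicals : List (String × List (String × String))) (personal_radicals : List (String × String)) : Option String :=
  let name_lower := PySem.Str.lower name
  match pvAPersonal name_lower personal_radicals with
  | some char => some char
  | none => pvAWk name_lower wk_radicals

-- ===== PORT B =====
-- the getD "" stands for info["name"]'s KeyError branch, never taken inside Pre_
def reverse_lookup_radical_alt (name : String) (wk_radicals : List (String × List (String × String))) (personal_radicals : List (String × String)) : Option String :=
  let wk_map := wk_radicals.foldl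
    (fun d p => d.setdefault (PySem.Str.lower (((PySem.Dict.mk p.2).get? "name").getD "")) p.1)
    PySem.Dict.empty
  let personal_map := personal_radicals.foldl
    (fun d p => d.setdefault (PySem.Str.lower p.2) p.1)
    PySem.Dict.empty
  let merged := personal_map.items.foldl (fun d p => d.insert p.1 p.2) wk_map
  merged.get? (PySem.Str.lower name)

-- ===== PRECONDITION & SPEC =====
-- Pre_ excludes inputs where some WK info dict lacks the "name" key: Python A raises
-- KeyError whenever its WK scan reaches such an entry, and B's eager index
-- construction always raises KeyError there (even when a personal match would have
-- let A return early — see the cite).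
def Pre_reverse_lookup_radical (name : String) (wk_radicals : List (String × List (String × String))) (personal_radicals : List (String × String)) : Prop :=
  ∀ p ∈ wk_radicals, ((PySem.Dict.mk p.2).get? "name").isSome = true
instance (name : String) (wk_radicals : List (String × List (String × String))) (personal_radicals : List (String × String)) : Decidable (Pre_reverse_lookup_radical name wk_radicals personal_radicals) := by unfold Pre_reverse_lookup_radical; infer_instance

def pvWitness_reverse_lookup_radical : String × (List (String × List (String × String))) × (List (String × String)) :=
  ("Water", [("W", [("name", "water")]), ("G", [("name", "ground")])], [("F", "fire")])

def Spec_reverse_lookup_radical (name : String) (wk_radicals : List (String × List (String × String))) (personal_radicals : List (String × String)) (out : Option String) : Prop := out = reverse_lookup_radical_alt name wk_radicals personal_radicals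
instance (name : String) (wk_radicals : List (String × List (String × String))) (personal_radicals : List (String × String)) (out : Option String) : Decidable (Spec_reverse_lookup_radical name wk_radicals personal_radicals out) := by unfold Spec_reverse_lookup_radical; infer_instance

-- ===== CLAIM (what is proved, stated in full; the proofs are below) =====
def Claim_equal_reverse_lookup_radical : Prop := ∀ (name : String) (wk_radicals : List (String × List (String × String))) (personal_radicals : List (String × String)), Dom_reverse_lookup_radical name wk_radicals personal_radicals → Pre_reverse_lookup_radical name wk_radicals personal_radicals → Spec_reverse_lookup_radical name wk_radicals personal_radicals (reverse_lookup_radical name wk_radicals personal_radicals)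

-- ===== LEMMAS AND PROOFS =====

-- the setdefault loop over personal_radicals computes: earlier dict, else first list match
theorem pvPersonalFold (per : List (String × String)) (d : PySem.Dict String String) (k : String) :
    (per.foldl (fun d p => d.setdefault (PySem.Str.lower p.2) p.1) d).get? k
      = (d.get? k).or (pvAPersonal k per) := by
  induction per generalizing d with
  | nil => simp [pvAPersonal]
  | cons p t ih =>
      obtain ⟨c, r⟩ := p
      simp only [List.foldl_cons, ih, pvAPersonal]
      by_cases h : PySem.Str.lower r = k
      · subst h
        rw [PySem.Dict.get?_setdefault_self]
        cases hd : d.get? (PySem.Str.lower r) <;> simp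
      · rw [PySem.Dict.get?_setdefault_of_ne d c (Ne.symm h)]
        simp [h]

-- the setdefault loop over wk_radicals computes A's WK scan, given every info has "name"
theorem pvWkFold (wk : List (String × List (String × String))) (d : PySem.Dict String String) (k : String)
    (h : ∀ p ∈ wk, ((PySem.Dict.mk p.2).get? "name").isSome = true) :
    (wk.foldl (fun d p => d.setdefault (PySem.Str.lower (((PySem.Dict.mk p.2).get? "name").getD "")) p.1) d).get? k
      = (d.get? k).or (pvAWk k wk) := by
  induction wk generalizing d with
  | nil => simp [pvAWk]
  | cons p t ih =>
      obtain ⟨c, info⟩ := p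
      have hname : ((PySem.Dict.mk info).get? "name").isSome = true := h _ (List.mem_cons_self ..)
      obtain ⟨s, hs⟩ := Option.isSome_iff_exists.mp hname
      simp only [List.foldl_cons, ih _ (fun q hq => h q (List.mem_cons_of_mem _ hq)), pvAWk, hs,
        Option.getD_some]
      by_cases hk : PySem.Str.lower s = k
      · subst hk
        rw [PySem.Dict.get?_setdefault_self]
        cases hd : d.get? (PySem.Str.lower s) <;> simp
      · rw [PySem.Dict.get?_setdefault_of_ne d c (Ne.symm hk)]
        simp [hk]

-- keys stay unique through a setdefault loop
theorem pvNodupSetdefault (per : List (String × String)) (d : PySem.Dict String String)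
    (key : String × String → String)
    (h : d.keys.Nodup) :
    (per.foldl (fun d p => d.setdefault (key p) p.1) d).keys.Nodup := by
  induction per generalizing d with
  | nil => exact h
  | cons p t ih =>
      simp only [List.foldl_cons]
      apply ih
      by_cases hc : d.contains (key p) = true
      · rw [PySem.Dict.setdefault_of_contains d p.1 hc]; exact h
      · rw [PySem.Dict.setdefault_of_not_contains d p.1 (by simpa using hc)]
        exact PySem.Dict.nodup_keys_insert d (key p) p.1 h

-- inserting a nodup-keyed items list: the inserted entries win, else the base dict
theorem pvMergeFold (qs : List (String × String)) (d : PySem.Dict String String) (k : String)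
    (hnd : (qs.map (·.1)).Nodup) :
    (qs.foldl (fun d p => d.insert p.1 p.2) d).get? k
      = ((PySem.Dict.mk qs).get? k).or (d.get? k) := by
  induction qs generalizing d with
  | nil => simp [PySem.Dict.get?]
  | cons q t ih =>
      obtain ⟨a, v⟩ := q
      simp only [List.map_cons, List.nodup_cons] at hnd
      simp only [List.foldl_cons, ih _ hnd.2, PySem.Dict.get?_mk_cons]
      by_cases hk : a = k
      · subst hk
        have ht : (PySem.Dict.mk t).get? a = none := by
          rw [PySem.Dict.get?_eq_none_iff_not_mem_keys]
          simpa [PySem.Dict.keys] using hnd.1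
        simp [ht, PySem.Dict.get?_insert_self]
      · rw [PySem.Dict.get?_insert_of_ne d v (Ne.symm hk)]
        simp [hk]

-- ===== VERDICT (by name: the statement is the Claim_ definition above) =====
theorem reverse_lookup_radical_spec : Claim_equal_reverse_lookup_radical := by
  intro name wk per _ hpre
  unfold Spec_reverse_lookup_radical reverse_lookup_radical reverse_lookup_radical_alt
  have hnd : ((per.foldl (fun d p => d.setdefault (PySem.Str.lower p.2) p.1)
      PySem.Dict.empty).items.map (·.1)).Nodup := by
    have := pvNodupSetdefault per PySem.Dict.empty (fun p => PySem.Str.lower p.2)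
      PySem.Dict.nodup_keys_empty
    simpa [PySem.Dict.keys] using this
  rw [pvMergeFold _ _ _ hnd]
  have hmk : (PySem.Dict.mk
      ((per.foldl (fun d p => d.setdefault (PySem.Str.lower p.2) p.1) PySem.Dict.empty).items))
      = per.foldl (fun d p => d.setdefault (PySem.Str.lower p.2) p.1) PySem.Dict.empty := rfl
  rw [hmk, pvPersonalFold, pvWkFold _ _ _ hpre]
  simp only [PySem.Dict.get?_empty, Option.none_or]
  cases pvAPersonal (PySem.Str.lower name) per <;> simp
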